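-- pv_equiv track=rewrite | github.com/juanRodriguez1411/Trabajos-Juan | ejercicio5.py | calcular_sueldos
-- ===== SOURCE A (Python) =====
-- def calcular_sueldos(empleados):
--     sueldos_entre_1_y_3_millones = 0
--     sueldos_mas_de_3_millones = 0
--     cantidad_empleados_entre_1_y_3_millones = 0
--     cantidad_empleados_mas_de_3_millones = 0
--
--     for sueldo in empleados:
--         if 1_000_000 <= sueldo < 3_000_000:
--             cantidad_empleados_entre_1_y_3_millones += 1
--             sueldos_entre_1_y_3_millones += sueldo
--         elif sueldo >= 3_000_000:
--             cantidad_empleados_mas_de_3_millones += 1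
--             sueldos_mas_de_3_millones += sueldo
--
--     total_gastos = sum(empleados)
--
--     return (cantidad_empleados_entre_1_y_3_millones, cantidad_empleados_mas_de_3_millones, total_gastos)
-- ===== SOURCE B (Python) =====
-- def calcular_sueldos(empleados):
--     c1 = sum(1 for s in empleados if 1_000_000 <= s < 3_000_000)
--     c2 = sum(1 for s in empleados if s >= 3_000_000)
--     total = sum(empleados)
--     return (c1, c2, total)
-- ===== Notes on version B (the rewrite author's own statement) =====
-- stated objective: simpler
-- what changed: Replaced the single branchy if/elif loop with four accumulators (two of them unused) by three independent filtered passes: count of the 1M-3M band, count of the >=3M band, and the total sum.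
import Mathlib
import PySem

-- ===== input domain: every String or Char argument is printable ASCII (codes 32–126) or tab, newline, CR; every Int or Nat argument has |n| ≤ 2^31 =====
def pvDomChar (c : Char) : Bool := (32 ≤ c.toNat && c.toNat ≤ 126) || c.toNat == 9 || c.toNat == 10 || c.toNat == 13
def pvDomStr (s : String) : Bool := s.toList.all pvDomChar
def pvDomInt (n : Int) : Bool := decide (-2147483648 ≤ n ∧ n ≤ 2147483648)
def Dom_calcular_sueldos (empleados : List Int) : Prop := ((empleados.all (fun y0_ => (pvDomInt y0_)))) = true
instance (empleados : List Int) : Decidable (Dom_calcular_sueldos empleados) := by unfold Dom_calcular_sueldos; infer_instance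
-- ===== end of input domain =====

-- B replaces A's single if/elif loop (with two unused band-sum accumulators) by three independent filtered passes; objective: simpler.


-- ===== PORT A =====
-- literal port: the loop with four accumulators (two band sums are computed but unused), then sum(empleados)
def calcular_sueldos (empleados : List Int) : Int × Int × Int :=
  let st := empleados.foldl
    (fun (acc : Int × Int × Int × Int) sueldo =>
      let (s13, s3, c13, c3) := acc
      if 1000000 ≤ sueldo ∧ sueldo < 3000000 then
        (s13 + sueldo, s3, c13 + 1, c3)
      else if sueldo ≥ 3000000 then
        (s13, s3 + sueldo, c13, c3 + 1)
      else acc)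
    (0, 0, 0, 0)
  let total_gastos := empleados.foldl (· + ·) 0
  (st.2.2.1, st.2.2.2, total_gastos)

-- ===== PORT B =====
-- three independent passes
def calcular_sueldos_alt (empleados : List Int) : Int × Int × Int :=
  let c1 : Int := ((empleados.filter (fun s => decide (1000000 ≤ s ∧ s < 3000000))).map (fun _ => (1 : Int))).sum
  let c2 : Int := ((empleados.filter (fun s => decide (s ≥ 3000000))).map (fun _ => (1 : Int))).sum
  let total : Int := empleados.sum
  (c1, c2, total)

-- ===== PRECONDITION & SPEC =====
def Spec_calcular_sueldos (empleados : List Int) (out : Int × Int × Int) : Prop := out = calcular_sueldos_alt empleados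
instance (empleados : List Int) (out : Int × Int × Int) : Decidable (Spec_calcular_sueldos empleados out) := by unfold Spec_calcular_sueldos; infer_instance

-- ===== CLAIM (what is proved, stated in full; the proofs are below) =====
def Claim_equal_calcular_sueldos : Prop := ∀ (empleados : List Int), Dom_calcular_sueldos empleados → Spec_calcular_sueldos empleados (calcular_sueldos empleados)

-- ===== LEMMAS AND PROOFS =====
lemma cs_loop_inv (empleados : List Int) (a b c d : Int) :
    empleados.foldl
      (fun (acc : Int × Int × Int × Int) sueldo =>
        let (s13, s3, c13, c3) := acc
        if 1000000 ≤ sueldo ∧ sueldo < 3000000 then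
          (s13 + sueldo, s3, c13 + 1, c3)
        else if sueldo ≥ 3000000 then
          (s13, s3 + sueldo, c13, c3 + 1)
        else acc)
      (a, b, c, d)
    = (a + ((empleados.filter (fun s => decide (1000000 ≤ s ∧ s < 3000000))).sum),
       b + ((empleados.filter (fun s => decide (s ≥ 3000000))).sum),
       c + ((empleados.filter (fun s => decide (1000000 ≤ s ∧ s < 3000000))).map (fun _ => (1 : Int))).sum,
       d + ((empleados.filter (fun s => decide (s ≥ 3000000))).map (fun _ => (1 : Int))).sum) := by
  induction empleados generalizing a b c d with
  | nil => simp
  | cons x xs ih =>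
    by_cases h1 : 1000000 ≤ x ∧ x < 3000000
    · have h2 : ¬ x ≥ 3000000 := by omega
      simp [List.foldl, h1, h2, ih, add_assoc]
    · by_cases h2 : x ≥ 3000000
      · simp [List.foldl, h1, h2, ih, add_assoc]
      · simp [List.foldl, h1, h2, ih]

lemma cs_total (empleados : List Int) : empleados.foldl (· + ·) 0 = empleados.sum := by
  rw [List.sum_eq_foldl]

-- ===== VERDICT (by name: the statement is the Claim_ definition above) =====
theorem calcular_sueldos_spec : Claim_equal_calcular_sueldos := by
  intro empleados _
  unfold Spec_calcular_sueldos calcular_sueldos calcular_sueldos_alt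
  simp only [cs_loop_inv, cs_total]
  simp
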